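-- pv_equiv track=rewrite | github.com/dmalac/AoC_2023 | Day13.py | whereIsMirror
-- ===== SOURCE A (Python) =====
-- def isAlmostSame(a, b) -> bool:
-- 	return True if sum([1 if x[0] != x[1] else 0 for x in list(zip(a,b))]) == 1 else False
--
-- def whereIsMirror(p: list, top: int, bottom: int, same: bool, almostSame: bool) -> int:
-- 	while same and bottom > top:
-- 		if p[top] != p[bottom]:
-- 			if almostSame and isAlmostSame(p[top], p[bottom]):
-- 				almostSame = False
-- 			else:
-- 				same = False
-- 		top += 1
-- 		bottom -= 1
-- 	return top if same and not almostSame else -1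
-- ===== SOURCE B (Python) =====
-- def isAlmostSame(a, b) -> bool:
-- 	return True if sum([1 if x[0] != x[1] else 0 for x in list(zip(a,b))]) == 1 else False
--
-- def whereIsMirror(p: list, top: int, bottom: int, same: bool, almostSame: bool) -> int:
-- 	if not same:
-- 		return -1
-- 	m = (bottom - top + 1) // 2 if bottom > top else 0
-- 	diffs = [(p[top + i], p[bottom - i]) for i in range(m) if p[top + i] != p[bottom - i]]
-- 	required = 1 if almostSame else 0
-- 	if len(diffs) == required and all(isAlmostSame(a, b) for a, b in diffs):
-- 		return top + m
-- 	return -1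
-- ===== Notes on version B (the rewrite author's own statement) =====
-- stated objective: simpler
-- what changed: Replaces A's while-loop that mutates four state variables (top/bottom/same/almostSame) with a closed-form pair count m = (bottom-top+1)//2, one comprehension collecting the mismatched row pairs, and a single count-plus-predicate check (len(diffs) == required and all pairs almost-same).
import Mathlib
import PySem

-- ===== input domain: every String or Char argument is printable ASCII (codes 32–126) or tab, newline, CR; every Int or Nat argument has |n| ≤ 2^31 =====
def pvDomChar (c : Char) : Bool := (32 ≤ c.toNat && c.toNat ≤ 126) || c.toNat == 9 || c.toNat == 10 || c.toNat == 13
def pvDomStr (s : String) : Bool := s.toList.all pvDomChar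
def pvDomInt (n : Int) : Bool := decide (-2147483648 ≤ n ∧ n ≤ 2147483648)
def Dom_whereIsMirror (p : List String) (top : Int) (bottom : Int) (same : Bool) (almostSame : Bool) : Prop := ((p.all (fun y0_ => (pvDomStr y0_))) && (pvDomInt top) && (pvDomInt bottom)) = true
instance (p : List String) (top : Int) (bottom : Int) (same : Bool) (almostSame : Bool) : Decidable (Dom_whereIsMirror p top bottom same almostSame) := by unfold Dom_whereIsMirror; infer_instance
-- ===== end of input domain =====

-- B replaces A's destructive while-loop over four mutable state variables by a closed-form
-- pair count m and one comprehension collecting the mismatched row pairs (objective: simpler).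

-- ===== PORT A =====
-- helper shared by both sources (Source B reuses A's isAlmostSame verbatim)
def isAlmostSame (a b : String) : Bool :=
  ((a.toList.zip b.toList).map (fun x => if x.1 ≠ x.2 then (1 : Int) else 0)).sum == 1

def whereIsMirror (p : List String) (top : Int) (bottom : Int) (same : Bool) (almostSame : Bool) : Int :=
  if _h : same = true ∧ top < bottom then
    if PySem.List.pyGetD p top "" ≠ PySem.List.pyGetD p bottom "" then
      if almostSame && isAlmostSame (PySem.List.pyGetD p top "") (PySem.List.pyGetD p bottom "") then
        whereIsMirror p (top + 1) (bottom - 1) same false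
      else
        whereIsMirror p (top + 1) (bottom - 1) false almostSame
    else
      whereIsMirror p (top + 1) (bottom - 1) same almostSame
  else
    if same && !almostSame then top else -1
termination_by (bottom - top).toNat
decreasing_by all_goals omega

-- ===== PORT B =====
def whereIsMirror_alt (p : List String) (top : Int) (bottom : Int) (same : Bool) (almostSame : Bool) : Int :=
  if !same then -1
  else
    let m : Int := if top < bottom then PySem.Int.floordiv (bottom - top + 1) 2 else 0
    let diffs := (PySem.List.pyRange 0 m 1).filterMap (fun i =>
      if PySem.List.pyGetD p (top + i) "" ≠ PySem.List.pyGetD p (bottom - i) ""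
      then some (PySem.List.pyGetD p (top + i) "", PySem.List.pyGetD p (bottom - i) "")
      else none)
    let required : Int := if almostSame then 1 else 0
    if (PySem.List.len diffs == required) && diffs.all (fun x => isAlmostSame x.1 x.2) then
      top + m
    else -1

-- ===== PRECONDITION & SPEC =====
-- Pre_ excludes exactly the inputs on which Python A raises IndexError: when the loop runs at
-- all (same and bottom > top) its visited indices stay between top and bottom, so A raises iff
-- top or bottom is out of Python index range for p.
def Pre_whereIsMirror (p : List String) (top : Int) (bottom : Int) (same : Bool) (almostSame : Bool) : Prop :=
  same = true → top < bottom → (PySem.Raise.InRange p.length top ∧ PySem.Raise.InRange p.length bottom)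
instance (p : List String) (top : Int) (bottom : Int) (same : Bool) (almostSame : Bool) : Decidable (Pre_whereIsMirror p top bottom same almostSame) := by unfold Pre_whereIsMirror; infer_instance

def pvWitness_whereIsMirror : List String × Int × Int × Bool × Bool := (["#.#", "..#", "..#", "#.#"], 0, 3, true, false)

def Spec_whereIsMirror (p : List String) (top : Int) (bottom : Int) (same : Bool) (almostSame : Bool) (out : Int) : Prop := out = whereIsMirror_alt p top bottom same almostSame
instance (p : List String) (top : Int) (bottom : Int) (same : Bool) (almostSame : Bool) (out : Int) : Decidable (Spec_whereIsMirror p top bottom same almostSame out) := by unfold Spec_whereIsMirror; infer_instance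

-- ===== CLAIM (what is proved, stated in full; the proofs are below) =====
def Claim_equal_whereIsMirror : Prop := ∀ (p : List String) (top : Int) (bottom : Int) (same : Bool) (almostSame : Bool), Dom_whereIsMirror p top bottom same almostSame → Pre_whereIsMirror p top bottom same almostSame → Spec_whereIsMirror p top bottom same almostSame (whereIsMirror p top bottom same almostSame)

-- ===== LEMMAS AND PROOFS =====

-- the mismatched-pair list of B, as a named function of the pair count
def mirDiffs (p : List String) (top bottom m : Int) : List (String × String) :=
  (PySem.List.pyRange 0 m 1).filterMap (fun i =>
    if PySem.List.pyGetD p (top + i) "" ≠ PySem.List.pyGetD p (bottom - i) ""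
    then some (PySem.List.pyGetD p (top + i) "", PySem.List.pyGetD p (bottom - i) "")
    else none)

-- B's pair count
def mirM (top bottom : Int) : Int :=
  if top < bottom then PySem.Int.floordiv (bottom - top + 1) 2 else 0

lemma alt_eq (p : List String) (top bottom : Int) (almostSame : Bool) :
    whereIsMirror_alt p top bottom true almostSame =
      if (PySem.List.len (mirDiffs p top bottom (mirM top bottom)) == (if almostSame then 1 else 0))
          && (mirDiffs p top bottom (mirM top bottom)).all (fun x => isAlmostSame x.1 x.2) then
        top + mirM top bottom
      else -1 := by
  simp [whereIsMirror_alt, mirDiffs, mirM]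

lemma mirM_succ (top bottom : Int) (h : top < bottom) :
    mirM top bottom = mirM (top + 1) (bottom - 1) + 1 := by
  unfold mirM
  rw [PySem.Int.floordiv_eq_ediv_of_pos (by omega)]
  by_cases h2 : top + 1 < bottom - 1
  · rw [if_pos h, if_pos h2, PySem.Int.floordiv_eq_ediv_of_pos (by omega)]
    omega
  · rw [if_pos h, if_neg h2]
    omega

lemma mirM_pos (top bottom : Int) (h : top < bottom) : 0 < mirM top bottom := by
  unfold mirM
  rw [if_pos h, PySem.Int.floordiv_eq_ediv_of_pos (by omega)]
  omega

lemma mirDiffs_succ (p : List String) (top bottom m : Int) (hm : 0 < m) :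
    mirDiffs p top bottom m =
      (if PySem.List.pyGetD p top "" ≠ PySem.List.pyGetD p bottom ""
       then [(PySem.List.pyGetD p top "", PySem.List.pyGetD p bottom "")] else []) ++
      mirDiffs p (top + 1) (bottom - 1) (m - 1) := by
  unfold mirDiffs
  rw [PySem.List.pyRange_one_cons (by omega)]
  rw [List.filterMap_cons]
  have hshift : PySem.List.pyRange (0 + 1) m 1 =
      (PySem.List.pyRange 0 (m - 1) 1).map (fun i => i + 1) := by
    rw [PySem.List.pyRange_one, PySem.List.pyRange_one, List.map_map]
    have : (m - (0 + 1)).toNat = (m - 1 - 0).toNat := by omega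
    rw [this]
    apply List.map_congr_left
    intro k _
    simp; omega
  rw [hshift, List.filterMap_map]
  have tail : List.filterMap
      ((fun i =>
        if PySem.List.pyGetD p (top + i) "" ≠ PySem.List.pyGetD p (bottom - i) ""
        then some (PySem.List.pyGetD p (top + i) "", PySem.List.pyGetD p (bottom - i) "")
        else none) ∘ fun i => i + 1) (PySem.List.pyRange 0 (m - 1) 1) =
      List.filterMap (fun i =>
        if PySem.List.pyGetD p (top + 1 + i) "" ≠ PySem.List.pyGetD p (bottom - 1 - i) ""
        then some (PySem.List.pyGetD p (top + 1 + i) "", PySem.List.pyGetD p (bottom - 1 - i) "")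
        else none) (PySem.List.pyRange 0 (m - 1) 1) := by
    apply List.filterMap_congr
    intro i _
    simp only [Function.comp]
    have e1 : top + (i + 1) = top + 1 + i := by ring
    have e2 : bottom - (i + 1) = bottom - 1 - i := by ring
    rw [e1, e2]
  rw [tail]
  simp only [add_zero, sub_zero]
  by_cases hd : PySem.List.pyGetD p top "" ≠ PySem.List.pyGetD p bottom ""
  · rw [if_pos hd, if_pos hd]; rfl
  · rw [if_neg hd, if_neg hd]; rfl

lemma alt_base (p : List String) (top bottom : Int) (almostSame : Bool) (h : ¬ top < bottom) :
    whereIsMirror_alt p top bottom true almostSame = if almostSame then -1 else top := by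
  rw [alt_eq]
  have hm : mirM top bottom = 0 := by unfold mirM; rw [if_neg h]
  rw [hm]
  have hd : mirDiffs p top bottom 0 = [] := by
    unfold mirDiffs
    rw [PySem.List.pyRange_one_eq_nil (by omega)]
    rfl
  rw [hd]
  cases almostSame <;> simp [PySem.List.len]

lemma alt_false (p : List String) (top bottom : Int) (almostSame : Bool) :
    whereIsMirror_alt p top bottom false almostSame = -1 := by
  simp [whereIsMirror_alt]

-- one loop step of A, mirrored on B's closed form
lemma alt_step (p : List String) (top bottom : Int) (almostSame : Bool) (h : top < bottom) :
    whereIsMirror_alt p top bottom true almostSame =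
      if PySem.List.pyGetD p top "" ≠ PySem.List.pyGetD p bottom "" then
        if almostSame && isAlmostSame (PySem.List.pyGetD p top "") (PySem.List.pyGetD p bottom "") then
          whereIsMirror_alt p (top + 1) (bottom - 1) true false
        else -1
      else
        whereIsMirror_alt p (top + 1) (bottom - 1) true almostSame := by
  have hmp := mirM_pos top bottom h
  have hm := mirM_succ top bottom h
  set m' := mirM (top + 1) (bottom - 1) with hm'
  have hsplit := mirDiffs_succ p top bottom (m' + 1) (by omega)
  have hmm : m' + 1 - 1 = m' := by ring
  rw [hmm] at hsplit
  set a := PySem.List.pyGetD p top "" with ha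
  set b := PySem.List.pyGetD p bottom "" with hb
  set ds := mirDiffs p (top + 1) (bottom - 1) m' with hds
  by_cases hab : a ≠ b
  · rw [if_pos hab] at hsplit
    rw [if_pos hab]
    cases almostSame
    · -- no smudge budget: A goes dead, B's required count 0 cannot hold
      rw [Bool.false_and, if_neg Bool.false_ne_true, alt_eq, hm, hsplit]
      split_ifs <;> first | rfl | contradiction
    · by_cases hS : isAlmostSame a b = true
      · -- smudge consumed: counts shift by one
        rw [hS, Bool.and_self, if_pos rfl]
        rw [alt_eq, hm, hsplit, alt_eq, ← hm', ← hds]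
        have hv : top + (m' + 1) = top + 1 + m' := by ring
        rw [hv]
        apply if_congr _ rfl rfl
        simp only [List.singleton_append, PySem.List.len_eq, List.length_cons, List.all_cons,
          hS, Bool.true_and, Bool.and_eq_true, beq_iff_eq, Bool.false_eq_true, if_false]
        simp only [if_true]
        constructor <;> rintro ⟨h1, h2⟩ <;> exact ⟨by omega, h2⟩
      · -- fatal mismatch
        have hS' : isAlmostSame a b = false := by simpa using hS
        rw [hS', Bool.and_false, if_neg Bool.false_ne_true, alt_eq, hm, hsplit]
        split_ifs <;>
          first
            | rfl
            | contradiction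
            | (exfalso
               simp only [hS', PySem.List.len_eq, List.singleton_append, List.length_cons,
                 List.all_cons, Bool.and_eq_true, Bool.false_and, beq_iff_eq] at *
               first | omega | contradiction | simp_all)
  · rw [if_neg hab] at hsplit
    rw [if_neg hab]
    rw [List.nil_append] at hsplit
    rw [alt_eq, hm, hsplit, alt_eq, ← hm', ← hds]
    split_ifs <;> omega

lemma ab_main (p : List String) (top bottom : Int) (same almostSame : Bool) :
    whereIsMirror p top bottom same almostSame = whereIsMirror_alt p top bottom same almostSame := by
  cases same
  · rw [alt_false]
    unfold whereIsMirror
    simp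
  · by_cases h : top < bottom
    · rw [whereIsMirror, dif_pos ⟨rfl, h⟩, alt_step p top bottom almostSame h]
      by_cases hab : PySem.List.pyGetD p top "" ≠ PySem.List.pyGetD p bottom ""
      · rw [if_pos hab, if_pos hab]
        by_cases hsm : (almostSame && isAlmostSame (PySem.List.pyGetD p top "") (PySem.List.pyGetD p bottom "")) = true
        · rw [if_pos hsm, if_pos hsm]
          exact ab_main p (top + 1) (bottom - 1) true false
        · rw [if_neg hsm, if_neg hsm, ab_main p (top + 1) (bottom - 1) false almostSame, alt_false]
      · rw [if_neg hab, if_neg hab]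
        exact ab_main p (top + 1) (bottom - 1) true almostSame
    · rw [whereIsMirror, dif_neg (by tauto), alt_base p top bottom almostSame h]
      cases almostSame <;> simp
termination_by (bottom - top).toNat
decreasing_by all_goals omega

-- ===== VERDICT (by name: the statement is the Claim_ definition above) =====
theorem whereIsMirror_spec : Claim_equal_whereIsMirror := by
  intro p top bottom same almostSame _ _
  unfold Spec_whereIsMirror
  exact ab_main p top bottom same almostSame
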